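-- pv_equiv track=rewrite | github.com/JEEVAfr/Leet-Code | 2614-maximum-count-of-positive-integer-and-negative-integer/2614-maximum-count-of-positive-integer-and-negative-integer.py | maximumCount
-- ===== SOURCE A (Python) =====
-- from typing import List
--
-- def maximumCount(nums: List[int]) -> int:
--
--     maximum = 0
--     minimum = 0
--
--     for i in nums:
--
--         if i < 0:
--             minimum += 1
--         elif i > 0:
--             maximum += 1
--
--     return max(maximum, minimum)
-- ===== SOURCE B (Python) =====
-- from typing import List
--
-- def _lower(nums, pred):
--     # first index whose element does NOT satisfy pred, by binary search
--     lo, hi = 0, len(nums)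
--     while lo < hi:
--         mid = (lo + hi) // 2
--         if pred(nums[mid]):
--             lo = mid + 1
--         else:
--             hi = mid
--     return lo
--
-- def maximumCount(nums: List[int]) -> int:
--     s = sorted(nums)
--     neg = _lower(s, lambda x: x < 0)
--     nonpos = _lower(s, lambda x: x <= 0)
--     return max(len(s) - nonpos, neg)
-- ===== Notes on version B (the rewrite author's own statement) =====
-- stated objective: alternative
-- what changed: Instead of A's single counting pass with two accumulators, B sorts the list and locates the negative/positive zero-crossing boundaries with two binary searches, reading both counts off the boundary indices.
import Mathlib
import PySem

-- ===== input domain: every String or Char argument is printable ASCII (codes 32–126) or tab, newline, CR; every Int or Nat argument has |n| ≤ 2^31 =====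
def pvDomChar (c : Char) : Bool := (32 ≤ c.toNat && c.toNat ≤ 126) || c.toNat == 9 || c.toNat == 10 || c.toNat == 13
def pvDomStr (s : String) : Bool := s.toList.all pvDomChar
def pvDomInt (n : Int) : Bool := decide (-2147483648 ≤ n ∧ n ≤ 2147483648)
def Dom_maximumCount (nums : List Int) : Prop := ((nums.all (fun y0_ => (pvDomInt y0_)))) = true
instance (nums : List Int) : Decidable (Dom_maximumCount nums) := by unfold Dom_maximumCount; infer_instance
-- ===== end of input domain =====

-- B sorts the list and reads both counts off binary-searched sign boundaries, instead of
-- A's counting pass with two accumulators; a structural alternative, not claimed faster.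


-- ===== PORT A =====
-- one pass, two counters (maximum = positives, minimum = negatives), return the larger
def maximumCount (nums : List Int) : Int :=
  let s := nums.foldl
    (fun (st : Int × Int) i =>
      if i < 0 then (st.1, st.2 + 1)
      else if i > 0 then (st.1 + 1, st.2)
      else st)
    (0, 0)
  max s.1 s.2

-- ===== PORT B =====
-- port of Source B's _lower: binary search for the first index whose element does not satisfy p.
-- nums[mid] is in range on every reachable call (lo < hi ≤ len), so List.getD is exact here.
def pvLower (p : Int → Bool) (nums : List Int) (lo hi : Nat) : Nat :=
  if lo < hi then
    let mid := (lo + hi) / 2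
    if p (nums.getD mid 0) then pvLower p nums (mid + 1) hi
    else pvLower p nums lo mid
  else lo
termination_by hi - lo
decreasing_by all_goals omega

def maximumCount_alt (nums : List Int) : Int :=
  let s := PySem.List.sorted nums (fun x => x) false
  let neg := pvLower (fun x => decide (x < 0)) s 0 s.length
  let nonpos := pvLower (fun x => decide (x ≤ 0)) s 0 s.length
  max ((s.length : Int) - (nonpos : Int)) (neg : Int)

-- ===== PRECONDITION & SPEC =====
def Spec_maximumCount (nums : List Int) (out : Int) : Prop := out = maximumCount_alt nums
instance (nums : List Int) (out : Int) : Decidable (Spec_maximumCount nums out) := by unfold Spec_maximumCount; infer_instance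

-- ===== CLAIM (what is proved, stated in full; the proofs are below) =====
def Claim_equal_maximumCount : Prop := ∀ (nums : List Int), Dom_maximumCount nums → Spec_maximumCount nums (maximumCount nums)

-- ===== LEMMAS AND PROOFS =====

-- A's fold adds the positive / negative counts to the accumulator
lemma foldA_eq (nums : List Int) (a b : Int) :
    nums.foldl
      (fun (st : Int × Int) i =>
        if i < 0 then (st.1, st.2 + 1)
        else if i > 0 then (st.1 + 1, st.2)
        else st)
      (a, b)
    = (a + nums.countP (fun x => decide (0 < x)), b + nums.countP (fun x => decide (x < 0))) := by
  induction nums generalizing a b with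
  | nil => simp
  | cons x xs ih =>
    simp only [List.foldl_cons, List.countP_cons]
    by_cases hx : x < 0
    · have h2 : ¬ (0 < x) := by omega
      simp [hx, h2, ih]; ring
    · by_cases h2 : 0 < x
      · simp [hx, h2, ih]; ring
      · simp [hx, h2, ih]

-- a boundary index determines countP
lemma countP_of_boundary (p : Int → Bool) (nums : List Int) (b : Nat)
    (hb : b ≤ nums.length)
    (h1 : ∀ i, i < b → p (nums.getD i 0) = true)
    (h2 : ∀ i, b ≤ i → i < nums.length → p (nums.getD i 0) = false) :
    nums.countP p = b := by
  induction nums generalizing b with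
  | nil => simp only [List.countP_nil]; simp only [List.length_nil] at hb; omega
  | cons x xs ih =>
    cases b with
    | zero =>
      have hx : p x = false := h2 0 (by omega) (by simp)
      have : xs.countP p = 0 := by
        apply ih 0 (by omega) (by omega)
        intro i _ hi
        exact h2 (i + 1) (by omega) (by simpa using hi)
      simp [hx, this]
    | succ b' =>
      have hx : p x = true := h1 0 (by omega)
      have : xs.countP p = b' := by
        apply ih b' (by simpa using hb)
        · intro i hi; exact h1 (i + 1) (by omega)
        · intro i hbi hi; exact h2 (i + 1) (by omega) (by simpa using hi)
      simp [hx, this]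

-- the binary search maintains the boundary invariant and lands on the boundary
lemma pvLower_inv (p : Int → Bool) (nums : List Int) (lo hi : Nat)
    (hhi : hi ≤ nums.length) (hlh : lo ≤ hi)
    (hmono : ∀ i j, i ≤ j → j < nums.length → p (nums.getD j 0) = true → p (nums.getD i 0) = true)
    (hlo : ∀ i, i < lo → p (nums.getD i 0) = true)
    (hup : ∀ i, hi ≤ i → i < nums.length → p (nums.getD i 0) = false) :
    pvLower p nums lo hi ≤ nums.length ∧
    (∀ i, i < pvLower p nums lo hi → p (nums.getD i 0) = true) ∧
    (∀ i, pvLower p nums lo hi ≤ i → i < nums.length → p (nums.getD i 0) = false) := by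
  fun_induction pvLower p nums lo hi with
  | case1 lo hi h mid hp ih =>
    apply ih (by omega) (by omega)
    · intro i hi'
      exact hmono i mid (by omega) (by omega) hp
    · exact hup
  | case2 lo hi h mid hp ih =>
    apply ih (by omega) (by omega) hlo
    intro i hmid hlen
    by_cases hpi : p (nums.getD i 0) = true
    · exact absurd (hmono mid i hmid hlen hpi) (by simpa [List.getD] using hp)
    · simpa using hpi
  | case3 lo hi h =>
    refine ⟨by omega, hlo, ?_⟩
    intro i hi' hlen
    exact hup i (by omega) hlen

-- on a sorted list, pvLower from the full range computes countP of a downward-closed predicate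
lemma pvLower_countP (p : Int → Bool) (nums : List Int)
    (hs : List.Pairwise (· ≤ ·) nums)
    (hdc : ∀ x y : Int, x ≤ y → p y = true → p x = true) :
    pvLower p nums 0 nums.length = nums.countP p := by
  have hmono : ∀ i j, i ≤ j → j < nums.length → p (nums.getD j 0) = true → p (nums.getD i 0) = true := by
    intro i j hij hj hp
    have hi : i < nums.length := by omega
    rw [List.getD_eq_getElem _ _ hi] at *
    rw [List.getD_eq_getElem _ _ hj] at hp
    rcases Nat.lt_or_ge i j with hlt | hge
    · exact hdc _ _ (List.pairwise_iff_getElem.mp hs i j hi hj hlt) hp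
    · have : i = j := by omega
      subst this; exact hp
  obtain ⟨h1, h2, h3⟩ := pvLower_inv p nums 0 nums.length (le_refl _) (by omega) hmono
    (by omega) (by intro i h h'; omega)
  exact (countP_of_boundary p nums _ h1 h2 h3).symm

lemma countP_pos_add_nonpos (nums : List Int) :
    nums.countP (fun x => decide (0 < x)) + nums.countP (fun x => decide (x ≤ 0)) = nums.length := by
  induction nums with
  | nil => simp
  | cons x xs ih =>
    by_cases hx : 0 < x
    · have : ¬ x ≤ 0 := by omega
      simp [hx, this]; omega
    · have : x ≤ 0 := by omega
      simp [hx, this]; omega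

-- ===== VERDICT (by name: the statement is the Claim_ definition above) =====
theorem maximumCount_spec : Claim_equal_maximumCount := by
  intro nums _
  unfold Spec_maximumCount maximumCount maximumCount_alt
  rw [foldA_eq]
  have hperm : (PySem.List.sorted nums (fun x => x) false).Perm nums :=
    PySem.List.sorted_perm nums (fun x => x) false
  have hpair : (PySem.List.sorted nums (fun x => x) false).Pairwise (· ≤ ·) := by
    simpa using PySem.List.sorted_pairwise nums (fun x : Int => x)
  have h1 := pvLower_countP (fun x => decide (x < 0)) _ hpair (by intro x y hxy hp; simp at *; omega)
  have h2 := pvLower_countP (fun x => decide (x ≤ 0)) _ hpair (by intro x y hxy hp; simp at *; omega)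
  simp only [h1, h2]
  simp only [hperm.countP_eq, hperm.length_eq]
  have h := countP_pos_add_nonpos nums
  omega
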